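-- pv_equiv track=rewrite | github.com/majacQ/instakit | instakit/utils/mode.py | split_abbreviations
-- ===== SOURCE A (Python) =====
-- def split_abbreviations(s):
--     """ Split a string into a tuple of its unique constituents,
--         based on its internal capitalization -- to wit:
--
--         >>> split_abbreviations('RGB')
--         ('R', 'G', 'B')
--         >>> split_abbreviations('CMYK')
--         ('C', 'M', 'Y', 'K')
--         >>> split_abbreviations('YCbCr')
--         ('Y', 'Cb', 'Cr')
--         >>> split_abbreviations('sRGB')
--         ('R', 'G', 'B')
--         >>> split_abbreviations('XYZZ')
--         ('X', 'Y', 'Z')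
--
--         If you still find this function inscrutable,
--         have a look here: https://gist.github.com/4027079
--     """
--     abbreviations = []
--     current_token = ''
--     for char in s:
--         if current_token is '':
--             current_token += char
--         elif char.islower():
--             current_token += char
--         else:
--             if not current_token.islower():
--                 if current_token not in abbreviations:
--                     abbreviations.append(current_token)
--             current_token = ''
--             current_token += char
--     if current_token is not '':
--         if current_token not in abbreviations:
--             abbreviations.append(current_token)
--     return tuple(abbreviations)
-- ===== SOURCE B (Python) =====
-- def split_abbreviations(s):
--     # Pass 1: split s into maximal tokens: a new token starts at each
--     # non-lowercase character (and at the start of the string).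
--     tokens = []
--     for ch in s:
--         if tokens and ch.islower():
--             tokens[-1] += ch
--         else:
--             tokens.append(ch)
--     # Pass 2: keep tokens that are not all-lowercase (the final token is
--     # kept unconditionally, as in the original), deduplicated in order.
--     result = []
--     last = len(tokens) - 1
--     for i, t in enumerate(tokens):
--         if (i == last or not t.islower()) and t not in result:
--             result.append(t)
--     return tuple(result)
-- ===== Notes on version B (the rewrite author's own statement) =====
-- stated objective: alternative
-- what changed: Replaces A's single stateful loop (abbreviations + current_token mutated together, with an inline flush at each boundary and after the loop) by two separate passes: first tokenize the string into maximal capitalization tokens, then filter/deduplicate the token list with an index-based rule (last token kept regardless of case, as in A).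
import Mathlib
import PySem

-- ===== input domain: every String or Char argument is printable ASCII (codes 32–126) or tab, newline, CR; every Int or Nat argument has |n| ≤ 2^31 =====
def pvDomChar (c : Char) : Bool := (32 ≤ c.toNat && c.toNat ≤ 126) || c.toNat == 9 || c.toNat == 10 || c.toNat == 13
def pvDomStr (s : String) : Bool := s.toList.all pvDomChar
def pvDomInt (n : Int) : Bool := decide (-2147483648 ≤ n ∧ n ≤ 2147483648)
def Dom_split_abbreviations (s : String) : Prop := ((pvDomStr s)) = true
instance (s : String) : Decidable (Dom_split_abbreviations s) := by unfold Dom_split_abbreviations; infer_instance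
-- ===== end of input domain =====

-- B replaces A's single stateful loop by two passes (tokenize, then filter/dedup); same objective, no speed claim.

-- Python str.islower() ported by hand (exact on the ASCII domain):
-- at least one cased character, and no uppercase character.
def pvStrIslower (t : String) : Bool :=
  t.toList.any PySem.Chars.islower && t.toList.all (fun c => !PySem.Chars.isupper c)

-- ===== PORT A =====
-- loop body of A: state = (abbreviations, current_token)
def pvStepA (st : List String × String) (c : Char) : List String × String :=
  if st.2 = "" then (st.1, st.2.push c)
  else if PySem.Chars.islower c then (st.1, st.2.push c)
  else
    let abbrs := if pvStrIslower st.2 = false then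
                   (if st.2 ∉ st.1 then st.1 ++ [st.2] else st.1)
                 else st.1
    (abbrs, ("".push c))

def split_abbreviations (s : String) : List String :=
  let st := s.toList.foldl pvStepA ([], "")
  if st.2 ≠ "" then (if st.2 ∉ st.1 then st.1 ++ [st.2] else st.1) else st.1

-- ===== PORT B =====
-- pass 1 loop body of B: extend the last token on a lowercase char, else start a new one
def pvStepB (toks : List String) (c : Char) : List String :=
  if toks ≠ [] ∧ PySem.Chars.islower c then toks.dropLast ++ [toks.getLast!.push c]
  else toks ++ [String.ofList [c]]

def split_abbreviations_alt (s : String) : List String :=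
  let toks := s.toList.foldl pvStepB []
  let last : Int := (toks.length : Int) - 1
  (PySem.List.enumerate toks).foldl
    (fun res it =>
      if (it.1 = last ∨ pvStrIslower it.2 = false) ∧ it.2 ∉ res then res ++ [it.2] else res) []

-- ===== PRECONDITION & SPEC =====
def Spec_split_abbreviations (s : String) (out : List String) : Prop := out = split_abbreviations_alt s
instance (s : String) (out : List String) : Decidable (Spec_split_abbreviations s out) := by unfold Spec_split_abbreviations; infer_instance

-- ===== CLAIM (what is proved, stated in full; the proofs are below) =====
def Claim_equal_split_abbreviations : Prop := ∀ (s : String), Dom_split_abbreviations s → Spec_split_abbreviations s (split_abbreviations s)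

-- ===== LEMMAS AND PROOFS =====

-- common description of the filtering pass: intermediate tokens kept when not
-- all-lowercase and new; the final token kept when new.
def pvFilt : List String → List String → List String
  | acc, [] => acc
  | acc, [t] => if t ∉ acc then acc ++ [t] else acc
  | acc, t :: u :: rest =>
      pvFilt (if pvStrIslower t = false ∧ t ∉ acc then acc ++ [t] else acc) (u :: rest)

theorem pvPush_ne (t : String) (c : Char) : t.push c ≠ "" := by
  intro h
  have := congrArg String.toList h
  simp at this

theorem pvStepB_ne (ts : List String) (c : Char) : pvStepB ts c ≠ [] := by
  unfold pvStepB; split <;> simp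

theorem pvStepB_cons (t : String) (ts : List String) (c : Char) (h : ts ≠ []) :
    pvStepB (t :: ts) c = t :: pvStepB ts c := by
  cases ts with
  | nil => exact absurd rfl h
  | cons u us =>
    unfold pvStepB
    by_cases hc : PySem.Chars.islower c = true
    · simp [hc, List.getLast!, List.getLast]
    · simp [hc]

theorem pvFoldB_cons (cs : List Char) (t : String) (ts : List String) (h : ts ≠ []) :
    cs.foldl pvStepB (t :: ts) = t :: cs.foldl pvStepB ts := by
  induction cs generalizing ts with
  | nil => rfl
  | cons c cs ih =>
    simp only [List.foldl_cons, pvStepB_cons t ts c h]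
    exact ih _ (pvStepB_ne ts c)

theorem pvFoldB_ne (cs : List Char) (ts : List String) (h : ts ≠ []) :
    cs.foldl pvStepB ts ≠ [] := by
  induction cs generalizing ts with
  | nil => exact h
  | cons c cs ih => exact ih _ (pvStepB_ne ts c)

-- A's loop-plus-final-append equals pvFilt applied to B's token list
theorem pvA_eq_filt (cs : List Char) (abbrs : List String) (tok : String) (h : tok ≠ "") :
    (let st := cs.foldl pvStepA (abbrs, tok)
     if st.2 ≠ "" then (if st.2 ∉ st.1 then st.1 ++ [st.2] else st.1) else st.1)
    = pvFilt abbrs (cs.foldl pvStepB [tok]) := by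
  induction cs generalizing abbrs tok with
  | nil => simp [h, pvFilt]
  | cons c cs ih =>
    by_cases hc : PySem.Chars.islower c = true
    · have hstep : pvStepA (abbrs, tok) c = (abbrs, tok.push c) := by
        unfold pvStepA; simp [h, hc]
      have hstepB : pvStepB [tok] c = [tok.push c] := by
        unfold pvStepB; simp [hc, List.getLast!]
      simp only [List.foldl_cons, hstep, hstepB]
      exact ih _ _ (pvPush_ne tok c)
    · have hstep : pvStepA (abbrs, tok) c =
          ((if pvStrIslower tok = false then
              (if tok ∉ abbrs then abbrs ++ [tok] else abbrs) else abbrs), "".push c) := by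
        unfold pvStepA; simp [h, hc]
      have hstepB : pvStepB [tok] c = [tok, String.ofList [c]] := by
        unfold pvStepB; simp [hc]
      have hpc : ("".push c) = String.ofList [c] := rfl
      simp only [List.foldl_cons, hstep, hstepB, hpc]
      rw [pvFoldB_cons cs tok [String.ofList [c]] (by simp)]
      have hne : cs.foldl pvStepB [String.ofList [c]] ≠ [] := pvFoldB_ne _ _ (by simp)
      obtain ⟨u, us, hu⟩ := List.exists_cons_of_ne_nil hne
      have hone : String.ofList [c] ≠ "" := by
        intro hh; have := congrArg String.toList hh; simp at this
      rw [ih _ (String.ofList [c]) hone, hu, pvFilt]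
      by_cases hl : pvStrIslower tok = false
      · simp [hl]
      · simp [hl]

-- B's indexed second pass equals pvFilt
theorem pvEnumFold (n : Int) (l : List String) (o : Int) (acc : List String)
    (hn : o + l.length = n) :
    (PySem.List.enumerate l o).foldl
      (fun res it =>
        if (it.1 = n - 1 ∨ pvStrIslower it.2 = false) ∧ it.2 ∉ res then res ++ [it.2] else res) acc
    = pvFilt acc l := by
  induction l generalizing o acc with
  | nil => simp [PySem.List.enumerate_nil, pvFilt]
  | cons t rest ih =>
    rw [PySem.List.enumerate_cons, List.foldl_cons]
    cases rest with
    | nil =>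
      have ho : o = n - 1 := by simp at hn; omega
      simp only [PySem.List.enumerate_nil, List.foldl_nil, pvFilt]
      by_cases hm : t ∉ acc
      · simp [ho, hm]
      · simp [ho, hm]
    | cons u us =>
      have ho : ¬ (o = n - 1) := by simp at hn; omega
      rw [ih (o + 1) _ (by simp at hn ⊢; omega)]
      simp only [pvFilt]
      by_cases hl : pvStrIslower t = false ∧ t ∉ acc
      · simp [ho, hl.1, hl.2]
      · rcases not_and_or.mp hl with h1 | h2
        · simp at h1
          simp [ho, h1]
        · simp at h2
          simp [ho, h2]

-- ===== VERDICT (by name: the statement is the Claim_ definition above) =====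
theorem split_abbreviations_spec : Claim_equal_split_abbreviations := by
  intro s _
  unfold Spec_split_abbreviations split_abbreviations split_abbreviations_alt
  cases hs : s.toList with
  | nil => simp [PySem.List.enumerate_nil]
  | cons c cs =>
    have hA : pvStepA ([], "") c = ([], "".push c) := by unfold pvStepA; simp
    have hB : pvStepB [] c = [String.ofList [c]] := by unfold pvStepB; simp
    simp only [List.foldl_cons, hA, hB]
    have h1 : ("".push c) = String.ofList [c] := rfl
    rw [h1]
    rw [pvA_eq_filt cs [] (String.ofList [c]) (by intro h; have := congrArg String.toList h; simp at this)]
    exact (pvEnumFold _ _ 0 [] (by simp)).symm
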